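-- pv_equiv track=rewrite | github.com/yyyhang/roman_arabic | roman_arabic.py | result
-- ===== SOURCE A (Python) =====
-- def result(combination):
--     first = combination.pop(0)
--     pos = [first]
--     for i in combination:
--         a = '_' + i
--         b = i
--         j = 0
--         lenth = len(pos)
--         while j < lenth:
--             pre = pos.pop(0)
--             pos.append(pre+a)
--             pos.append(pre+b)
--             j += 1
--     return pos
-- ===== SOURCE B (Python) =====
-- import itertools
--
--
-- def result(combination):
--     # Note: like A, this pops the first element off the caller's list (in-place
--     # mutation) and raises IndexError on an empty list.
--     first = combination.pop(0)
--     return [first + ''.join(combo)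
--             for combo in itertools.product(*[('_' + i, i) for i in combination])]
-- ===== Notes on version B (the rewrite author's own statement) =====
-- stated objective: idiomatic
-- what changed: Replaces the FIFO doubling loop (repeated pop(0)/append rounds over a growing work list) with a direct enumeration of the 2^n variants via itertools.product over the ('_'+i, i) choice pairs.
import Mathlib
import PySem

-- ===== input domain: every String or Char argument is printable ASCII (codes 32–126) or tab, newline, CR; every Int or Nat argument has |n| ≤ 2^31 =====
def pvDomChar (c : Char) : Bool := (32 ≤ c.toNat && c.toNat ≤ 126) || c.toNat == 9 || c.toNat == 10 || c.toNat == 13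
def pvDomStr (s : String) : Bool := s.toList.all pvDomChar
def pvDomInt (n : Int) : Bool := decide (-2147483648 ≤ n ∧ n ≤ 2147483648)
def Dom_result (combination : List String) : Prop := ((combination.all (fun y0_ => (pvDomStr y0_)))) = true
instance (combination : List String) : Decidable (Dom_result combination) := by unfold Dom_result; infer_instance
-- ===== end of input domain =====

-- B replaces A's FIFO doubling loop with a direct enumeration of the 2^n variants
-- via itertools.product over the ('_'+i, i) choice pairs (objective: idiomatic).
-- Both A and B pop the first element off the caller's list (same in-place mutation);
-- the equivalence proved here is about the return value.

-- ===== PORT A =====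
-- the inner 'while j < lenth' loop: fuel = lenth, each step pops the front and
-- appends pre+a, pre+b at the back ([]-case is Python's pop-from-empty, unreachable)
def resultInner (a b : String) : Nat → List String → List String
  | 0, pos => pos
  | _ + 1, [] => []
  | n + 1, pre :: rest => resultInner a b n (rest ++ [pre ++ a, pre ++ b])

def result (combination : List String) : List String :=
  match combination with
  | [] => []   -- Python: combination.pop(0) raises IndexError here; excluded by Pre_result
  | first :: rest =>
      rest.foldl (fun pos i => resultInner ("_" ++ i) i pos.length pos) [first]

-- ===== PORT B =====
-- itertools.product over the list of choice pairs (leftmost factor varies slowest)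
def resultProduct : List (String × String) → List (List String)
  | [] => [[]]
  | (a, b) :: ps =>
      (resultProduct ps).map (fun c => a :: c) ++ (resultProduct ps).map (fun c => b :: c)

def result_alt (combination : List String) : List String :=
  match combination with
  | [] => []   -- Python: combination.pop(0) raises IndexError here; excluded by Pre_result
  | first :: rest =>
      (resultProduct (rest.map (fun i => ("_" ++ i, i)))).map
        (fun combo => first ++ PySem.Str.join "" combo)

-- ===== PRECONDITION & SPEC =====
-- Pre_ excludes only the empty list, on which Python's combination.pop(0) raises IndexError.
def Pre_result (combination : List String) : Prop := combination ≠ []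
instance (combination : List String) : Decidable (Pre_result combination) := by
  unfold Pre_result; infer_instance

def pvWitness_result : List String := ["ab", "c", "_d"]

def Spec_result (combination : List String) (out : List String) : Prop := out = result_alt combination
instance (combination : List String) (out : List String) : Decidable (Spec_result combination out) := by
  unfold Spec_result; infer_instance

-- ===== CLAIM (what is proved, stated in full; the proofs are below) =====
def Claim_equal_result : Prop := ∀ (combination : List String), Dom_result combination → Pre_result combination → Spec_result combination (result combination)

-- ===== LEMMAS AND PROOFS =====

theorem join_empty_nil : PySem.Str.join "" ([] : List String) = "" := by decide

theorem join_empty_cons (c : String) (cs : List String) :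
    PySem.Str.join "" (c :: cs) = c ++ PySem.Str.join "" cs := by
  apply String.toList_inj.mp
  cases cs with
  | nil => simp [PySem.Chars.join_singleton, join_empty_nil]
  | cons d ds => simp [PySem.Chars.join_cons_cons]

theorem resultInner_eq (a b : String) : ∀ (n : Nat) (pos : List String), n ≤ pos.length →
    resultInner a b n pos = pos.drop n ++ (pos.take n).flatMap (fun p => [p ++ a, p ++ b]) := by
  intro n
  induction n with
  | zero => intro pos _; simp [resultInner]
  | succ n ih =>
      intro pos hle
      cases pos with
      | nil => simp at hle
      | cons p rest =>
          have hn : n ≤ rest.length := by simpa using hle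
          rw [resultInner, ih (rest ++ [p ++ a, p ++ b]) (by simp; omega)]
          simp [List.drop_append_of_le_length hn, List.take_append_of_le_length hn,
            List.flatMap_cons]

theorem flatMap_assoc' {α β γ : Type} (l : List α) (f : α → List β) (g : β → List γ) :
    (l.flatMap f).flatMap g = l.flatMap (fun x => (f x).flatMap g) := by
  induction l with
  | nil => simp
  | cons a l ih => simp [ih]

theorem foldl_eq : ∀ (rest pos : List String),
    rest.foldl (fun pos i => resultInner ("_" ++ i) i pos.length pos) pos
      = pos.flatMap (fun p =>
          (resultProduct (rest.map (fun i => ("_" ++ i, i)))).map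
            (fun combo => p ++ PySem.Str.join "" combo)) := by
  intro rest
  induction rest with
  | nil =>
      intro pos
      simp [resultProduct, join_empty_nil]
  | cons i rest ih =>
      intro pos
      have hstep : resultInner ("_" ++ i) i pos.length pos
          = pos.flatMap (fun p => [p ++ ("_" ++ i), p ++ i]) := by
        simpa using resultInner_eq ("_" ++ i) i pos.length pos le_rfl
      rw [List.foldl_cons, hstep, ih, flatMap_assoc']
      congr 1
      funext p
      simp [resultProduct, List.map_map, Function.comp_def, join_empty_cons,
        String.append_assoc]

-- ===== VERDICT (by name: the statement is the Claim_ definition above) =====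
theorem result_spec : Claim_equal_result := by
  intro combination _ hpre
  unfold Spec_result
  cases combination with
  | nil => exact absurd rfl hpre
  | cons first rest =>
      simp [result, result_alt, foldl_eq]
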